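-- pv_equiv track=rewrite | github.com/shuiqukeyou/itag_py3 | dataload.py | weight_one_hot
-- ===== SOURCE A (Python) =====
-- def weight_one_hot(words, tags):
--     one_hots = []
--     for value in tags:
--         d = []
--         for w in words:
--             # 读取文章中的每一个词，如果这个词和tag相同，则将其标记为1，否则标记为0
--             if w == value:
--                 d.append(1)
--             else:
--                 d.append(0)
--         one_hots.append(d)
--     return one_hots
-- ===== SOURCE B (Python) =====
-- def weight_one_hot(words, tags):
--     # Inverted index: word -> list of column positions where it occurs.
--     index = {}
--     for i, w in enumerate(words):
--         index.setdefault(w, []).append(i)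
--     n = len(words)
--     one_hots = []
--     for t in tags:
--         row = [0] * n
--         for i in index.get(t, []):
--             row[i] = 1
--         one_hots.append(row)
--     return one_hots
-- ===== Notes on version B (the rewrite author's own statement) =====
-- stated objective: alternative
-- what changed: B builds an inverted index word->positions in one pass over words, then fills each tag's row sparsely from the index instead of comparing every word to every tag.
import Mathlib
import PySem

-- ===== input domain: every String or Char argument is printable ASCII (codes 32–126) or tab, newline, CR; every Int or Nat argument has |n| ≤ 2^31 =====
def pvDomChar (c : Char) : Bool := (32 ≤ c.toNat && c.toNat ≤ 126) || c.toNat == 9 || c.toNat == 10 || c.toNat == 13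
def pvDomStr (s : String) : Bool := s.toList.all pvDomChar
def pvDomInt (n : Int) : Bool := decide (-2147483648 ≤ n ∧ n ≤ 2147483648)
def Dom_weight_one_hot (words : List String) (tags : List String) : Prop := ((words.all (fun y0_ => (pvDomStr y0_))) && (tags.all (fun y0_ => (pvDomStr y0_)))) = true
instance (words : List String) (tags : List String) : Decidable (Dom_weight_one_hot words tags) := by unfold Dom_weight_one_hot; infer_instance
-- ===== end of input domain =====

-- B replaces the all-pairs equality scan with an inverted index (word -> positions) and a sparse row fill: an alternative data-structure decomposition.


-- ===== PORT A =====
def weight_one_hot (words : List String) (tags : List String) : List (List Int) :=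
  tags.foldl (fun one_hots value =>
    one_hots ++ [words.foldl (fun d w => d ++ [if w == value then (1:Int) else 0]) []]) []

-- ===== PORT B =====
def weight_one_hot_alt (words : List String) (tags : List String) : List (List Int) :=
  let index : PySem.Dict String (List Int) :=
    (PySem.List.enumerate words 0).foldl
      (fun d p => PySem.Dict.modify d p.2 [] (fun l => l ++ [p.1])) PySem.Dict.empty
  let n := words.length
  tags.foldl (fun one_hots t =>
    one_hots ++ [(PySem.Dict.getD index t []).foldl
      (fun row i => PySem.List.pySetD row i 1) (List.replicate n (0:Int))]) []

-- ===== PRECONDITION & SPEC =====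
def Spec_weight_one_hot (words : List String) (tags : List String) (out : List (List Int)) : Prop := out = weight_one_hot_alt words tags
instance (words : List String) (tags : List String) (out : List (List Int)) : Decidable (Spec_weight_one_hot words tags out) := by unfold Spec_weight_one_hot; infer_instance

-- ===== CLAIM (what is proved, stated in full; the proofs are below) =====
def Claim_equal_weight_one_hot : Prop := ∀ (words : List String) (tags : List String), Dom_weight_one_hot words tags → Spec_weight_one_hot words tags (weight_one_hot words tags)

-- ===== LEMMAS AND PROOFS =====

-- The grouping loop: what the inverted index holds at a key.
theorem indexGetD (l : List (Int × String)) (d : PySem.Dict String (List Int)) (t : String) :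
    (l.foldl (fun d p => PySem.Dict.modify d p.2 [] (fun l => l ++ [p.1])) d).getD t []
      = d.getD t [] ++ (l.filter (fun p => p.2 == t)).map (·.1) := by
  induction l generalizing d with
  | nil => simp
  | cons p l ih =>
    simp only [List.foldl_cons, ih, List.filter_cons]
    rw [PySem.Dict.getD_modify]
    by_cases h : p.2 = t
    · simp [h]
    · simp [h, Ne.symm h, beq_iff_eq]

-- The sparse fill, pointwise.
theorem foldl_setD_getElem? (S : List Int) (r : List Int) (k : Nat)
    (hS : ∀ i ∈ S, 0 ≤ i ∧ i < r.length) :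
    (S.foldl (fun r i => PySem.List.pySetD r i 1) r)[k]?
      = if (k : Int) ∈ S then some 1 else r[k]? := by
  induction S generalizing r with
  | nil => simp
  | cons i S ih =>
    obtain ⟨h0, hlt⟩ := hS i (by simp)
    have hset : PySem.List.pySetD r i (1:Int) = r.set i.toNat 1 :=
      PySem.List.pySetD_of_nonneg r 1 h0
    have hlen : (r.set i.toNat (1:Int)).length = r.length := List.length_set
    simp only [List.foldl_cons, hset]
    rw [ih (r.set i.toNat 1) (by intro j hj; rw [hlen]; exact hS j (by simp [hj]))]
    by_cases hmem : (k : Int) ∈ S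
    · simp [hmem]
    · by_cases hk : (k : Int) = i
      · have hik : i.toNat = k := by omega
        subst hik
        have hklt : i.toNat < r.length := by omega
        simp [hk, hklt]
      · have hne : i.toNat ≠ k := by omega
        simp [hmem, hk, List.getElem?_set_ne hne]

-- Positions recorded for a tag: membership characterisation.
theorem mem_ids (words : List String) (t : String) (k : Nat) :
    ((k : Int) ∈ ((PySem.List.enumerate words 0).filter (fun p => p.2 == t)).map (·.1))
      ↔ ∃ h : k < words.length, words[k] = t := by
  simp only [List.mem_map, List.mem_filter, PySem.List.mem_enumerate_iff, beq_iff_eq]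
  constructor
  · rintro ⟨p, ⟨⟨j, hj, rfl⟩, ht⟩, hk⟩
    simp only [zero_add] at hk ht
    have : j = k := by exact_mod_cast hk
    subst this
    exact ⟨hj, ht⟩
  · rintro ⟨hk, ht⟩
    exact ⟨((k : Int), words[k]), ⟨⟨k, hk, by simp⟩, ht⟩, rfl⟩

-- Each of B's rows equals the corresponding row of A.
theorem row_eq (words : List String) (t : String) :
    (((PySem.List.enumerate words 0).filter (fun p => p.2 == t)).map (·.1)).foldl
        (fun row i => PySem.List.pySetD row i 1) (List.replicate words.length (0:Int))
      = words.map (fun w => if w == t then (1:Int) else 0) := by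
  apply List.ext_getElem?
  intro k
  rw [foldl_setD_getElem?]
  · by_cases hk : k < words.length
    · rw [List.getElem?_map, List.getElem?_eq_getElem hk]
      by_cases ht : words[k] = t
      · rw [if_pos ((mem_ids words t k).mpr ⟨hk, ht⟩)]
        simp [ht]
      · rw [if_neg (by rw [mem_ids]; rintro ⟨_, h⟩; exact ht h)]
        simp [hk, ht]
    · rw [if_neg (by rw [mem_ids]; rintro ⟨h, _⟩; exact hk h)]
      simp [hk]
  · intro i hi
    simp only [List.mem_map, List.mem_filter, PySem.List.mem_enumerate_iff] at hi
    obtain ⟨p, ⟨⟨j, hj, rfl⟩, _⟩, rfl⟩ := hi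
    simp only [zero_add, List.length_replicate]
    exact ⟨by positivity, by exact_mod_cast hj⟩

-- ===== VERDICT (by name: the statement is the Claim_ definition above) =====
theorem weight_one_hot_spec : Claim_equal_weight_one_hot := by
  intro words tags _
  unfold Spec_weight_one_hot weight_one_hot weight_one_hot_alt
  simp only [PySem.List.foldl_append_singleton_eq_map, List.nil_append]
  apply List.map_congr_left
  intro t _
  rw [indexGetD, PySem.Dict.getD_empty, List.nil_append, row_eq]
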